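-- pv_equiv track=rewrite | github.com/maxtsypushtanov/deepthink-ui | backend/app/reasoning/proactive.py | _detect_productive_window
-- ===== SOURCE A (Python) =====
-- from collections import Counter, defaultdict
--
-- def _detect_productive_window(conversation_hours: list[tuple[int, int]]) -> tuple[int, int] | None:
--     """Detect user's typical productive window from conversation start times.
--
--     Returns (start_hour, end_hour) of the most active 3-hour window, or None.
--     """
--     if len(conversation_hours) < 5:
--         return None
--
--     # Count conversations per hour
--     hour_counts: Counter[int] = Counter()
--     for h, _ in conversation_hours:
--         hour_counts[h] += 1
--
--     if not hour_counts:
--         return None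
--
--     # Find the 3-hour window with the most conversations
--     best_start = 9
--     best_count = 0
--     for start in range(6, 22):  # 6:00 to 21:00
--         window_count = sum(hour_counts.get(h, 0) for h in range(start, start + 3))
--         if window_count > best_count:
--             best_count = window_count
--             best_start = start
--
--     if best_count < 3:
--         return None
--
--     return (best_start, best_start + 3)
-- ===== SOURCE B (Python) =====
-- def _detect_productive_window(conversation_hours):
--     """Prefix-sum re-implementation: build hour counts 6..23 once, then each
--     3-hour window is one subtraction instead of three Counter lookups."""
--     if len(conversation_hours) < 5:
--         return None
--
--     counts = [0] * 18  # counts[j] = conversations starting at hour j + 6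
--     for h, _ in conversation_hours:
--         if 6 <= h <= 23:
--             counts[h - 6] += 1
--
--     prefix = [0]
--     for c in counts:
--         prefix.append(prefix[-1] + c)  # prefix[i] = sum(counts[:i])
--
--     best_start, best_count = 9, 0
--     for start in range(6, 22):
--         window_count = prefix[start - 3] - prefix[start - 6]
--         if window_count > best_count:
--             best_start, best_count = start, window_count
--
--     if best_count < 3:
--         return None
--     return (best_start, best_start + 3)
-- ===== Notes on version B (the rewrite author's own statement) =====
-- stated objective: alternative
-- what changed: B replaces the Counter plus per-window triple-lookup re-summation by a fixed hour-count array for hours 6..23 and a prefix-sum array, so each 3-hour window count is a single subtraction prefix[start-3]-prefix[start-6]; the guards (<5, <3) and first-max tie-breaking are preserved.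
import Mathlib
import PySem

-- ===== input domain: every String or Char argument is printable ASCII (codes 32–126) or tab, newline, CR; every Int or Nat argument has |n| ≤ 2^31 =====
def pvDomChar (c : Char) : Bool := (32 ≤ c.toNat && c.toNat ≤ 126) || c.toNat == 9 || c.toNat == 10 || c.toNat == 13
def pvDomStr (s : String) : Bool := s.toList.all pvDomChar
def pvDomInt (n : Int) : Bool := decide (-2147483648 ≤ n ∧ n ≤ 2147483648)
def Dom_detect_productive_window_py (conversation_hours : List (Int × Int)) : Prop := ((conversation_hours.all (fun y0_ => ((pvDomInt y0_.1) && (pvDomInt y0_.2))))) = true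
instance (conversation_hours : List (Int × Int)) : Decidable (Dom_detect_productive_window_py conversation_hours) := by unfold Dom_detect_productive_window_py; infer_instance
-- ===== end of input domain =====

-- B replaces the per-window triple Counter lookup by a prefix-sum array over hours 6..23, so each window is one subtraction (alternative decomposition, same asymptotics).

-- ===== PORT A =====
def detect_productive_window_py (conversation_hours : List (Int × Int)) : Option (Int × Int) :=
  if conversation_hours.length < 5 then none
  else
    let hour_counts : PySem.Dict Int Int :=
      conversation_hours.foldl (fun d p => d.modify p.1 0 (· + 1)) PySem.Dict.empty
    if hour_counts.items = [] then none
    else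
      let best := (PySem.List.pyRange 6 22 1).foldl
        (fun best start =>
          let window_count := ((PySem.List.pyRange start (start + 3) 1).map
            (fun h => hour_counts.getD h 0)).sum
          if window_count > best.2 then (start, window_count) else best)
        ((9 : Int), (0 : Int))
      if best.2 < 3 then none else some (best.1, best.1 + 3)

-- ===== PORT B =====
def detect_productive_window_py_alt (conversation_hours : List (Int × Int)) : Option (Int × Int) :=
  if conversation_hours.length < 5 then none
  else
    let counts : List Int :=
      conversation_hours.foldl
        (fun cs p =>
          if 6 ≤ p.1 ∧ p.1 ≤ 23 then
            PySem.List.pySetD cs (p.1 - 6) (PySem.List.pyGetD cs (p.1 - 6) 0 + 1)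
          else cs)
        (List.replicate 18 (0 : Int))
    let pre := counts.foldl (fun ps c => ps ++ [PySem.List.pyGetD ps (-1) 0 + c]) [(0 : Int)]
    let best := (PySem.List.pyRange 6 22 1).foldl
      (fun best start =>
        let w := PySem.List.pyGetD pre (start - 3) 0 - PySem.List.pyGetD pre (start - 6) 0
        if w > best.2 then (start, w) else best)
      ((9 : Int), (0 : Int))
    if best.2 < 3 then none else some (best.1, best.1 + 3)

-- ===== PRECONDITION & SPEC =====
def Spec_detect_productive_window_py (conversation_hours : List (Int × Int)) (out : Option (Int × Int)) : Prop := out = detect_productive_window_py_alt conversation_hours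
instance (conversation_hours : List (Int × Int)) (out : Option (Int × Int)) : Decidable (Spec_detect_productive_window_py conversation_hours out) := by unfold Spec_detect_productive_window_py; infer_instance

-- ===== CLAIM (what is proved, stated in full; the proofs are below) =====
def Claim_equal_detect_productive_window_py : Prop := ∀ (conversation_hours : List (Int × Int)), Dom_detect_productive_window_py conversation_hours → Spec_detect_productive_window_py conversation_hours (detect_productive_window_py conversation_hours)

-- ===== LEMMAS AND PROOFS =====

-- occurrences of hour h among the first components
def pvHourCount (ch : List (Int × Int)) (h : Int) : Int :=
  ((ch.map Prod.fst).count h : Int)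

-- the common window value: conversations in hours s, s+1, s+2
def pvWin (ch : List (Int × Int)) (s : Int) : Int :=
  pvHourCount ch s + pvHourCount ch (s + 1) + pvHourCount ch (s + 2)

theorem counter_getD (ch : List (Int × Int)) (h : Int) :
    (ch.foldl (fun d p => d.modify p.1 0 (· + 1)) (PySem.Dict.empty : PySem.Dict Int Int)).getD h 0
      = pvHourCount ch h := by
  have : ch.foldl (fun d p => d.modify p.1 0 (· + 1)) (PySem.Dict.empty : PySem.Dict Int Int)
      = PySem.Dict.counter (ch.map Prod.fst) := by
    rw [PySem.Dict.counter_eq_foldl, List.foldl_map]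
  rw [this, PySem.Dict.getD_counter, pvHourCount]

theorem window_range (s : Int) :
    PySem.List.pyRange s (s + 3) 1 = [s, s + 1, s + 2] := by
  rw [PySem.List.pyRange_one_cons (by omega), PySem.List.pyRange_one_cons (by omega),
    PySem.List.pyRange_one_cons (by omega), PySem.List.pyRange_one_eq_nil (by omega)]
  norm_num
  omega

-- the B-side counting loop, as a named function
def pvStep (cs : List Int) (p : Int × Int) : List Int :=
  if 6 ≤ p.1 ∧ p.1 ≤ 23 then
    PySem.List.pySetD cs (p.1 - 6) (PySem.List.pyGetD cs (p.1 - 6) 0 + 1)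
  else cs

theorem counts_length (ch : List (Int × Int)) (cs : List Int) :
    (ch.foldl pvStep cs).length = cs.length := by
  induction ch generalizing cs with
  | nil => rfl
  | cons p t ih =>
    simp only [List.foldl_cons, ih]
    unfold pvStep
    split
    · rw [PySem.List.length_pySetD]
    · rfl

theorem counts_getD (ch : List (Int × Int)) (cs : List Int) (hlen : cs.length = 18)
    (j : Nat) (hj : j < 18) :
    (ch.foldl pvStep cs).getD j 0 = cs.getD j 0 + pvHourCount ch ((j : Int) + 6) := by
  induction ch generalizing cs with
  | nil => simp [pvHourCount]
  | cons p t ih =>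
    simp only [List.foldl_cons]
    have hstep : (pvStep cs p).length = 18 := by
      unfold pvStep; split
      · rw [PySem.List.length_pySetD]; exact hlen
      · exact hlen
    rw [ih (pvStep cs p) hstep]
    have hcount : pvHourCount (p :: t) ((j : Int) + 6)
        = pvHourCount t ((j : Int) + 6) + (if p.1 = (j : Int) + 6 then 1 else 0) := by
      by_cases he : p.1 = (j : Int) + 6 <;>
        simp [pvHourCount, he]
    rw [hcount]
    have hval : (pvStep cs p).getD j 0
        = cs.getD j 0 + (if p.1 = (j : Int) + 6 then 1 else 0) := by
      unfold pvStep
      split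
      · rename_i hp
        rw [PySem.List.pySetD_of_nonneg _ _ (by omega)]
        rw [PySem.List.pyGetD_of_nonneg _ _ (by omega)]
        by_cases he : p.1 = (j : Int) + 6
        · have hn : (p.1 - 6).toNat = j := by omega
          rw [hn]
          rw [List.getD_eq_getElem?_getD, List.getElem?_set_self (by omega)]
          simp [he]
        · have hn : (p.1 - 6).toNat ≠ j := by omega
          rw [List.getD_eq_getElem?_getD, List.getElem?_set_ne hn,
            ← List.getD_eq_getElem?_getD]
          simp [he]
      · rename_i hp
        have : ¬ p.1 = (j : Int) + 6 := by omega
        simp [this]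
    rw [hval]; ring

-- prefix-sum list helper: running sums starting from a
def pvPsums (a : Int) : List Int → List Int
  | [] => []
  | c :: cs => (a + c) :: pvPsums (a + c) cs

theorem fold_psums (cs : List Int) (acc : List Int) (hacc : acc ≠ []) :
    cs.foldl (fun ps c => ps ++ [PySem.List.pyGetD ps (-1) 0 + c]) acc
      = acc ++ pvPsums (PySem.List.pyGetD acc (-1) 0) cs := by
  induction cs generalizing acc with
  | nil => simp [pvPsums]
  | cons c t ih =>
    simp only [List.foldl_cons]
    rw [ih (acc ++ [PySem.List.pyGetD acc (-1) 0 + c]) (by simp)]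
    rw [PySem.List.pyGetD_neg_one_append_singleton]
    simp [pvPsums]

theorem psums_getD (cs : List Int) (a : Int) (i : Nat) (hi : i < cs.length) :
    (pvPsums a cs).getD i 0 = a + (cs.take (i + 1)).sum := by
  induction cs generalizing a i with
  | nil => simp at hi
  | cons c t ih =>
    cases i with
    | zero => simp [pvPsums]
    | succ k =>
      simp only [pvPsums, List.getD_cons_succ, List.take_succ_cons, List.sum_cons]
      rw [ih (a + c) k (by simpa using hi)]
      ring

theorem prefix_getD (cs : List Int) (hlen : cs.length = 18) (k : Nat) (hk : k ≤ 18) :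
    (cs.foldl (fun ps c => ps ++ [PySem.List.pyGetD ps (-1) 0 + c]) [(0 : Int)]).getD k 0
      = (cs.take k).sum := by
  rw [fold_psums cs [(0 : Int)] (by simp)]
  cases k with
  | zero => simp
  | succ m =>
    have hget : PySem.List.pyGetD [(0 : Int)] (-1) 0 = 0 := by
      rw [PySem.List.pyGetD_neg_one _ _ (by simp)]; rfl
    rw [hget]
    have : ([(0 : Int)] ++ pvPsums 0 cs).getD (m + 1) 0 = (pvPsums 0 cs).getD m 0 := by
      simp
    rw [this, psums_getD cs 0 m (by omega)]
    ring

theorem sum_take_three (cs : List Int) (hlen : cs.length = 18) (k : Nat) (hk : k + 3 ≤ 18) :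
    (cs.take (k + 3)).sum - (cs.take k).sum
      = cs.getD k 0 + cs.getD (k + 1) 0 + cs.getD (k + 2) 0 := by
  have h1 : k < cs.length := by omega
  have h2 : k + 1 < cs.length := by omega
  have h3 : k + 2 < cs.length := by omega
  have e1 := List.sum_take_succ cs k h1
  have e2 := List.sum_take_succ cs (k + 1) h2
  have e3 := List.sum_take_succ cs (k + 2) h3
  have g1 : cs.getD k 0 = cs[k] := List.getD_eq_getElem cs 0 h1
  have g2 : cs.getD (k + 1) 0 = cs[k + 1] := List.getD_eq_getElem cs 0 h2
  have g3 : cs.getD (k + 2) 0 = cs[k + 2] := List.getD_eq_getElem cs 0 h3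
  have : k + 3 = (k + 2) + 1 := by omega
  rw [this, e3, e2, e1, g1, g2, g3]
  ring

-- A's window sum equals pvWin, for any start
theorem a_window (ch : List (Int × Int)) (s : Int) :
    ((PySem.List.pyRange s (s + 3) 1).map
      (fun h => (ch.foldl (fun d p => d.modify p.1 0 (· + 1)) PySem.Dict.empty).getD h 0)).sum
      = pvWin ch s := by
  rw [window_range]
  simp only [List.map_cons, List.map_nil, List.sum_cons, List.sum_nil]
  rw [counter_getD, counter_getD, counter_getD, pvWin]
  ring

-- B's prefix difference equals pvWin, for start ∈ [6, 22)
theorem b_window (ch : List (Int × Int)) (s : Int) (hs1 : 6 ≤ s) (hs2 : s < 22) :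
    PySem.List.pyGetD
        ((ch.foldl pvStep (List.replicate 18 (0 : Int))).foldl
          (fun ps c => ps ++ [PySem.List.pyGetD ps (-1) 0 + c]) [(0 : Int)]) (s - 3) 0
      - PySem.List.pyGetD
        ((ch.foldl pvStep (List.replicate 18 (0 : Int))).foldl
          (fun ps c => ps ++ [PySem.List.pyGetD ps (-1) 0 + c]) [(0 : Int)]) (s - 6) 0
      = pvWin ch s := by
  set cs := ch.foldl pvStep (List.replicate 18 (0 : Int)) with hcs
  have hlen : cs.length = 18 := by
    rw [hcs, counts_length]; simp
  set k : Nat := (s - 6).toNat with hk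
  have hk3 : (s - 3).toNat = k + 3 := by omega
  have hk6 : (s - 6).toNat = k := by omega
  have hkle : k + 3 ≤ 18 := by omega
  rw [PySem.List.pyGetD_of_nonneg _ _ (by omega), PySem.List.pyGetD_of_nonneg _ _ (by omega),
    hk3, hk6, prefix_getD cs hlen (k + 3) (by omega), prefix_getD cs hlen k (by omega),
    sum_take_three cs hlen k hkle]
  have hc : ∀ (j : Nat), j < 18 → cs.getD j 0 = pvHourCount ch ((j : Int) + 6) := by
    intro j hj
    rw [hcs, counts_getD ch _ (by simp) j hj]
    rw [List.getD_eq_getElem?_getD, List.getElem?_replicate]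
    simp [hj]
  rw [hc k (by omega), hc (k + 1) (by omega), hc (k + 2) (by omega)]
  have e1 : ((k : Int)) + 6 = s := by omega
  have e2 : ((k : Int) + 1) + 6 = s + 1 := by omega
  have e3 : ((k : Int) + 2) + 6 = s + 2 := by omega
  rw [pvWin]
  push_cast
  rw [e1, e2, e3]

-- the counter of a nonempty list has nonempty items
theorem counter_items_ne (ch : List (Int × Int)) (hne : ch ≠ []) :
    (ch.foldl (fun d p => d.modify p.1 0 (· + 1)) (PySem.Dict.empty : PySem.Dict Int Int)).items ≠ [] := by
  have hc : ch.foldl (fun d p => d.modify p.1 0 (· + 1)) (PySem.Dict.empty : PySem.Dict Int Int)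
      = PySem.Dict.counter (ch.map Prod.fst) := by
    rw [PySem.Dict.counter_eq_foldl, List.foldl_map]
  rw [hc]
  intro hitems
  obtain ⟨p, t, rfl⟩ := List.exists_cons_of_ne_nil hne
  have hmem : p.1 ∈ (PySem.Dict.counter ((p :: t).map Prod.fst)).keys := by
    rw [PySem.Dict.keys_counter]
    rw [PySem.Set.mem_ofList]
    simp
  rw [PySem.Dict.keys] at hmem
  rw [hitems] at hmem
  simp at hmem

-- ===== VERDICT (by name: the statement is the Claim_ definition above) =====
theorem detect_productive_window_py_spec : Claim_equal_detect_productive_window_py := by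
  intro ch _
  unfold Spec_detect_productive_window_py detect_productive_window_py detect_productive_window_py_alt
  by_cases hlen : ch.length < 5
  · simp [hlen]
  · simp only [hlen, if_false]
    have hne : ch ≠ [] := by
      intro h; rw [h] at hlen; simp at hlen
    rw [if_neg (counter_items_ne ch hne)]
    have hfold :
        (PySem.List.pyRange 6 22 1).foldl
          (fun best start =>
            let window_count := ((PySem.List.pyRange start (start + 3) 1).map
              (fun h => (ch.foldl (fun d p => d.modify p.1 0 (· + 1))
                PySem.Dict.empty).getD h 0)).sum
            if window_count > best.2 then (start, window_count) else best)
          ((9 : Int), (0 : Int))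
        = (PySem.List.pyRange 6 22 1).foldl
          (fun best start =>
            let w := PySem.List.pyGetD
                ((ch.foldl (fun cs p =>
                    if 6 ≤ p.1 ∧ p.1 ≤ 23 then
                      PySem.List.pySetD cs (p.1 - 6) (PySem.List.pyGetD cs (p.1 - 6) 0 + 1)
                    else cs) (List.replicate 18 (0 : Int))).foldl
                  (fun ps c => ps ++ [PySem.List.pyGetD ps (-1) 0 + c]) [(0 : Int)]) (start - 3) 0
              - PySem.List.pyGetD
                ((ch.foldl (fun cs p =>
                    if 6 ≤ p.1 ∧ p.1 ≤ 23 then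
                      PySem.List.pySetD cs (p.1 - 6) (PySem.List.pyGetD cs (p.1 - 6) 0 + 1)
                    else cs) (List.replicate 18 (0 : Int))).foldl
                  (fun ps c => ps ++ [PySem.List.pyGetD ps (-1) 0 + c]) [(0 : Int)]) (start - 6) 0
            if w > best.2 then (start, w) else best)
          ((9 : Int), (0 : Int)) := by
      apply PySem.List.foldl_congr_mem
      intro acc s hs
      rw [PySem.List.mem_pyRange_one] at hs
      have hstep : (fun cs (p : Int × Int) =>
          if 6 ≤ p.1 ∧ p.1 ≤ 23 then
            PySem.List.pySetD cs (p.1 - 6) (PySem.List.pyGetD cs (p.1 - 6) 0 + 1)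
          else cs) = pvStep := by
        funext cs p; rfl
      simp only [hstep]
      rw [a_window ch s, b_window ch s hs.1 hs.2]
    simp only [hfold]
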